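-- pv_equiv track=rewrite | github.com/RATHOD-SHUBHAM/DataStructure-And-Algorithm | AlgoExpert/Dp/12. Numbers In Pi/dp.py | numbersInPi
-- ===== SOURCE A (Python) =====
-- import math
--
-- def numbersInPi(pi, numbers):
--     number = {x : True for x in numbers}
--
--     n = len(pi)
--
--     dp = [math.inf] * (n + 1)
--     dp[-1] = -1
--
--     for i in reversed(range(n)):
--         for j in range(i, n):
--             # grab the values in numbers
--             prefix = pi[i : j+1]
--
--             # check if this value is present
--             if prefix in number:
--                 # get the number of space from the next value
--                 get_space = 1 + dp[j + 1]
--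
--                 dp[i] = min(dp[i] , get_space)
--
--     return dp[0] if dp[0] != math.inf else -1
-- ===== SOURCE B (Python) =====
-- import math
-- from functools import lru_cache
--
-- def numbersInPi(pi, numbers):
--     known = set(numbers)
--     n = len(pi)
--
--     @lru_cache(maxsize=None)
--     def solve(i):
--         if i == n:
--             return -1
--         return min((1 + solve(j + 1) for j in range(i, n) if pi[i:j + 1] in known),
--                    default=math.inf)
--
--     result = solve(0)
--     return result if result != math.inf else -1
-- ===== Notes on version B (the rewrite author's own statement) =====
-- stated objective: alternative
-- what changed: Replaces A's bottom-up dp table (nested loops filling dp[n..0]) by top-down memoized recursion: solve(i) takes the min of 1+solve(j+1) over matching prefixes, with the same -1 base and inf-to--1 mapping.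
import Mathlib
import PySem

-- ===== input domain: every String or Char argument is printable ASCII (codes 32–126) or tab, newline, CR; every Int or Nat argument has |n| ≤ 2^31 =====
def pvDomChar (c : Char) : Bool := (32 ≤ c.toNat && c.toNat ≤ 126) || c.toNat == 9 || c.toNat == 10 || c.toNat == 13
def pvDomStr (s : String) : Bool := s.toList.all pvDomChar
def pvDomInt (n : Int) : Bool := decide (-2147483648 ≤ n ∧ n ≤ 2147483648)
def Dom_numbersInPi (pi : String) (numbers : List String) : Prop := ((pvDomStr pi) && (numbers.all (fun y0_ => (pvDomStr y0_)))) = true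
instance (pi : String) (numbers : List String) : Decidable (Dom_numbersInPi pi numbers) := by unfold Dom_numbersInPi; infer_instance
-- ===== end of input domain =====

-- B replaces A's bottom-up dp table by top-down memoized recursion on the same recurrence (objective: alternative decomposition).
-- math.inf is modelled as `none` in `Option Int` (dp values are either ints or inf); min/1+· lift accordingly.

-- ===== PORT A =====
-- min with none = +inf (Python's min on values that may be math.inf)
def optMin : Option Int → Option Int → Option Int
  | none, b => b
  | a, none => a
  | some a, some b => some (min a b)

-- inner loop of A for a fixed i: dp[i] = fold over j in range(i, n) (t = j - i);
-- `suffix` is dp[i+1..n], so dp[j+1] is suffix[t] (always in range: t < suffix.length).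
-- pi[i:j+1] = (piL.drop i).take (t+1) (exact: 0 ≤ i ≤ j < n, cf. PySem.List.slice_natCast).
def rowA (number : PySem.Dict (List Char) Bool) (piL : List Char) (i : Nat)
    (suffix : List (Option Int)) : Option Int :=
  (List.range suffix.length).foldl
    (fun acc t =>
      if number.contains ((piL.drop i).take (t + 1)) then
        optMin acc ((suffix.getD t none).map (fun v => 1 + v))
      else acc)
    none

-- the outer `for i in reversed(range(n))` loop: after k iterations the list is dp[n-k..n]
def dpA (number : PySem.Dict (List Char) Bool) (piL : List Char) : Nat → List (Option Int)
  | 0 => [some (-1)]          -- dp = [inf]*(n+1); dp[-1] = -1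
  | k + 1 =>
    let rest := dpA number piL k
    rowA number piL (piL.length - (k + 1)) rest :: rest

-- dict keys are kept as List Char (String.toList is injective, so `prefix in number` is unchanged)
def numbersInPi (pi : String) (numbers : List String) : Int :=
  match (dpA (numbers.foldl (fun d x => d.insert x.toList true) PySem.Dict.empty)
      pi.toList pi.toList.length).headD none with
  | some v => v
  | none => -1

-- ===== PORT B =====
-- solve(i) of Source B: min((1 + solve(j+1) for j in range(i, n) if pi[i:j+1] in known), default=inf),
-- folded with optMin from default none (= inf); t = j - i; memoization dropped (pure recursion computes the same values).
def solveB (known : PySem.Set (List Char)) (piL : List Char) (i : Nat) : Option Int :=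
  if i = piL.length then some (-1)
  else
    (List.range (piL.length - i)).attach.foldl
      (fun acc t =>
        if PySem.Set.contains known ((piL.drop i).take (t.1 + 1)) then
          optMin acc ((solveB known piL (i + t.1 + 1)).map (fun v => 1 + v))
        else acc)
      none
termination_by piL.length - i
decreasing_by
  have := List.mem_range.mp t.2
  omega

def numbersInPi_alt (pi : String) (numbers : List String) : Int :=
  match solveB (PySem.Set.ofList (numbers.map String.toList)) pi.toList 0 with
  | some v => v
  | none => -1

-- ===== PRECONDITION & SPEC =====
def Spec_numbersInPi (pi : String) (numbers : List String) (out : Int) : Prop := out = numbersInPi_alt pi numbers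
instance (pi : String) (numbers : List String) (out : Int) : Decidable (Spec_numbersInPi pi numbers out) := by unfold Spec_numbersInPi; infer_instance

-- ===== CLAIM (what is proved, stated in full; the proofs are below) =====
def Claim_equal_numbersInPi : Prop := ∀ (pi : String) (numbers : List String), Dom_numbersInPi pi numbers → Spec_numbersInPi pi numbers (numbersInPi pi numbers)

-- ===== LEMMAS AND PROOFS =====

-- membership agrees between A's dict and B's set
theorem contains_dict_eq_set (numbers : List String) (k : List Char) :
    (numbers.foldl (fun d x => d.insert x.toList true) PySem.Dict.empty).contains k
      = PySem.Set.contains (PySem.Set.ofList (numbers.map String.toList)) k := by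
  rw [Bool.eq_iff_iff]
  rw [PySem.Dict.contains_iff_mem_keys, PySem.Dict.keys_foldl_insert_key,
      PySem.Set.contains_iff]
  simp [PySem.Dict.keys_empty, PySem.Set.update_nil_left, PySem.Set.mem_ofList]

theorem solveB_len (known : PySem.Set (List Char)) (piL : List Char) :
    solveB known piL piL.length = some (-1) := by
  rw [solveB]; simp

-- dp[n-k..n] is [solveB (n-k), …, solveB n]
theorem dpA_eq (numbers : List String) (piL : List Char) (k : Nat) (hk : k ≤ piL.length) :
    dpA (numbers.foldl (fun d x => d.insert x.toList true) PySem.Dict.empty) piL k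
      = (List.range (k + 1)).map
          (fun t => solveB (PySem.Set.ofList (numbers.map String.toList)) piL (piL.length - k + t)) := by
  induction k with
  | zero =>
    simp [dpA, solveB_len]
  | succ k ih =>
    have hk' : k ≤ piL.length := by omega
    rw [dpA, ih hk']
    rw [List.range_succ_eq_map (n := k + 1), List.map_cons]
    congr 1
    · -- head: rowA at i = n - (k+1) equals solveB i
      set i := piL.length - (k + 1) with hi
      have hin : i ≠ piL.length := by omega
      simp only [Nat.add_zero]
      rw [solveB, if_neg hin]
      have hlen : ((List.range (k + 1)).map
          (fun t => solveB (PySem.Set.ofList (numbers.map String.toList)) piL (piL.length - k + t))).length = k + 1 := by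
        simp
      rw [rowA, hlen]
      have hni : piL.length - i = k + 1 := by omega
      rw [hni, List.foldl_attach (f := fun acc t =>
        if PySem.Set.contains (PySem.Set.ofList (numbers.map String.toList))
            ((piL.drop i).take (t + 1)) then
          optMin acc ((solveB (PySem.Set.ofList (numbers.map String.toList)) piL
            (i + t + 1)).map (fun v => 1 + v))
        else acc)]
      apply PySem.List.foldl_congr_mem
      intro acc t ht
      have htk : t < k + 1 := List.mem_range.mp ht
      rw [contains_dict_eq_set]
      have hgetD : ((List.range (k + 1)).map
          (fun t => solveB (PySem.Set.ofList (numbers.map String.toList)) piL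
            (piL.length - k + t))).getD t none
          = solveB (PySem.Set.ofList (numbers.map String.toList)) piL (piL.length - k + t) := by
        simp [List.getD_eq_getElem?_getD, htk]
      rw [hgetD]
      have hidx : piL.length - k + t = i + t + 1 := by omega
      rw [hidx]
    · -- tail: reindex n-k+t vs n-(k+1)+(t+1)
      rw [List.map_map]
      apply List.map_congr_left
      intro t ht
      have : piL.length - k + t = piL.length - (k + 1) + (t + 1) := by omega
      simp [this]

-- ===== VERDICT (by name: the statement is the Claim_ definition above) =====
theorem numbersInPi_spec : Claim_equal_numbersInPi := by
  intro pi numbers _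
  unfold Spec_numbersInPi numbersInPi numbersInPi_alt
  rw [dpA_eq numbers pi.toList pi.toList.length (le_refl _)]
  simp [List.range_succ_eq_map]
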